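-- pv_equiv track=rewrite | github.com/Querolj/Handwritting-code | tools.py | get_histo_2axis
-- ===== SOURCE A (Python) =====
-- def getWH(matrice):
-- 	return (len(matrice[0]), len(matrice))
--
-- def get_histo_2axis(matrice):
-- 	(width, height) = getWH(matrice)
-- 	histo_x = [0 for i in range(height)]
-- 	histo_y = [0 for i in range(width)]
--
-- 	for i in range(height):
-- 		for j in range(width):
-- 			if matrice[i][j] == 0:
-- 				histo_y[j] = histo_y[j] + 1
-- 				histo_x[i] = histo_x[i] + 1
-- 	return (histo_x, histo_y)
-- ===== SOURCE B (Python) =====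
-- def get_histo_2axis(matrice):
-- 	width = len(matrice[0])
-- 	height = len(matrice)
-- 	histo_x = [sum(1 for j in range(width) if matrice[i][j] == 0) for i in range(height)]
-- 	histo_y = [sum(1 for i in range(height) if matrice[i][j] == 0) for j in range(width)]
-- 	return (histo_x, histo_y)
-- ===== Notes on version B (the rewrite author's own statement) =====
-- stated objective: simpler
-- what changed: Replaces the fused nested loop that destructively increments two pre-zeroed histogram lists with two independent comprehension passes: a row-major pass counting zeros per row and a column-major pass counting zeros per column.
import Mathlib
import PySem

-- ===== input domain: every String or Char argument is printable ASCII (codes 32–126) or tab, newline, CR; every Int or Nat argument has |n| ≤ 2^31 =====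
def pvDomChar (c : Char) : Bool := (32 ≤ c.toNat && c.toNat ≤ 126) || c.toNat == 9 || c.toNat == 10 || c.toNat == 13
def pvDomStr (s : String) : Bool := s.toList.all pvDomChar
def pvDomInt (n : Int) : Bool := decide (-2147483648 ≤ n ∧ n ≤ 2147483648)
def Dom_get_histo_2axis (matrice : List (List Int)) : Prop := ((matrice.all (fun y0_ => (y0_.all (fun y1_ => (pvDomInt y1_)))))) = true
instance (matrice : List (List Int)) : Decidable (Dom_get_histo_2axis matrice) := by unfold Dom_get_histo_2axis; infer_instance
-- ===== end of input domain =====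

-- B computes the two zero-histograms in two independent passes (row-major and column-major
-- comprehensions) instead of A's single fused nested loop mutating two pre-zeroed lists; objective: simpler.


-- ===== PORT A =====
-- getWH: (len(matrice[0]), len(matrice)); Pre_ guarantees matrice ≠ [], so headD [] is matrice[0]
def getWH (matrice : List (List Int)) : Nat × Nat :=
  ((matrice.headD []).length, matrice.length)

-- the body of A's inner loop: 'if matrice[i][j] == 0: histo_y[j] += 1; histo_x[i] += 1'
-- (matrice[i][j] ported as nested getD; Pre_ keeps both indices in range, so defaults never fire)
def pvAInner (matrice : List (List Int)) (i : Nat) (st : List Int × List Int) (j : Nat) :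
    List Int × List Int :=
  if (matrice.getD i []).getD j 1 = 0 then
    (st.1.set i (st.1.getD i 0 + 1), st.2.set j (st.2.getD j 0 + 1))
  else st

def get_histo_2axis (matrice : List (List Int)) : List Int × List Int :=
  let wh := getWH matrice
  let width := wh.1
  let height := wh.2
  let histo_x : List Int := List.replicate height 0
  let histo_y : List Int := List.replicate width 0
  (List.range height).foldl
    (fun st i => (List.range width).foldl (pvAInner matrice i) st)
    (histo_x, histo_y)

-- ===== PORT B =====
def get_histo_2axis_alt (matrice : List (List Int)) : List Int × List Int :=
  let width := (matrice.headD []).length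
  let height := matrice.length
  let histo_x : List Int := (List.range height).map (fun i =>
    (List.range width).foldl
      (fun acc j => if (matrice.getD i []).getD j 1 = 0 then acc + 1 else acc) 0)
  let histo_y : List Int := (List.range width).map (fun j =>
    (List.range height).foldl
      (fun acc i => if (matrice.getD i []).getD j 1 = 0 then acc + 1 else acc) 0)
  (histo_x, histo_y)

-- ===== PRECONDITION & SPEC =====
-- Pre_ excludes exactly the inputs on which Python A raises IndexError: the empty matrix
-- (matrice[0]) and ragged matrices with a row shorter than the first row (matrice[i][j]).
def Pre_get_histo_2axis (matrice : List (List Int)) : Prop :=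
  matrice ≠ [] ∧ ∀ row ∈ matrice, (matrice.headD []).length ≤ row.length

instance (matrice : List (List Int)) : Decidable (Pre_get_histo_2axis matrice) := by
  unfold Pre_get_histo_2axis; infer_instance

def pvWitness_get_histo_2axis : List (List Int) := [[0, 1], [2, 0]]

def Spec_get_histo_2axis (matrice : List (List Int)) (out : List Int × List Int) : Prop := out = get_histo_2axis_alt matrice
instance (matrice : List (List Int)) (out : List Int × List Int) : Decidable (Spec_get_histo_2axis matrice out) := by unfold Spec_get_histo_2axis; infer_instance

-- ===== CLAIM (what is proved, stated in full; the proofs are below) =====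
def Claim_equal_get_histo_2axis : Prop := ∀ (matrice : List (List Int)), Dom_get_histo_2axis matrice → Pre_get_histo_2axis matrice → Spec_get_histo_2axis matrice (get_histo_2axis matrice)

-- ===== LEMMAS AND PROOFS =====

-- the zero-test both ports share (element access)
def pvF (m : List (List Int)) (i j : Nat) : Bool := (m.getD i []).getD j 1 == 0

lemma getD_set_eq (l : List Int) (n k : Nat) (a d : Int) :
    (l.set n a).getD k d = if n = k ∧ n < l.length then a else l.getD k d := by
  simp only [List.getD_eq_getElem?_getD, List.getElem?_set]
  split_ifs <;> simp_all <;> omega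

lemma foldl_count (p : Nat → Prop) [DecidablePred p] (js : List Nat) (a : Int) :
    js.foldl (fun acc j => if p j then acc + 1 else acc) a
      = a + ((js.countP (fun j => decide (p j)) : Nat) : Int) := by
  induction js generalizing a with
  | nil => simp
  | cons j js ih =>
    rw [List.foldl_cons, ih, List.countP_cons]
    split_ifs <;> simp_all <;> push_cast <;> ring

lemma countP_range_indicator (w k : Nat) (g : Nat → Bool) :
    (List.range w).countP (fun j => j == k && g j) = if k < w ∧ g k then 1 else 0 := by
  induction w with
  | zero => simp
  | succ w ih =>
    rw [List.range_succ, List.countP_append, ih]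
    simp only [List.countP_cons, List.countP_nil, Nat.zero_add]
    by_cases hk : k = w <;> by_cases hg : g k <;> split_ifs <;> simp_all <;> omega

lemma stepA_len₁ (m : List (List Int)) (i : Nat) (st : List Int × List Int) (j : Nat) :
    (pvAInner m i st j).1.length = st.1.length := by
  unfold pvAInner; split <;> simp

lemma stepA_len₂ (m : List (List Int)) (i : Nat) (st : List Int × List Int) (j : Nat) :
    (pvAInner m i st j).2.length = st.2.length := by
  unfold pvAInner; split <;> simp

lemma stepA_getD₁ (m : List (List Int)) (i : Nat) (st : List Int × List Int) (j k : Nat) :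
    (pvAInner m i st j).1.getD k 0 =
      st.1.getD k 0 + (if k = i ∧ i < st.1.length ∧ pvF m i j then 1 else 0) := by
  unfold pvAInner
  by_cases hc : (m.getD i []).getD j 1 = 0
  · have hf : pvF m i j = true := decide_eq_true hc
    rw [if_pos hc, getD_set_eq, hf]
    simp only [eq_self_iff_true, and_true]
    by_cases hik : i = k
    · subst hik
      by_cases hl : i < st.1.length
      · rw [if_pos ⟨rfl, hl⟩, if_pos ⟨rfl, hl⟩]
      · rw [if_neg (by tauto), if_neg (by tauto)]; ring
    · rw [if_neg (by tauto), if_neg (fun h => hik h.1.symm)]; ring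
  · have hf : pvF m i j = false := decide_eq_false hc
    rw [if_neg hc, hf]
    simp

lemma stepA_getD₂ (m : List (List Int)) (i : Nat) (st : List Int × List Int) (j k : Nat) :
    (pvAInner m i st j).2.getD k 0 =
      st.2.getD k 0 + (if j = k ∧ k < st.2.length ∧ pvF m i j then 1 else 0) := by
  unfold pvAInner
  by_cases hc : (m.getD i []).getD j 1 = 0
  · have hf : pvF m i j = true := decide_eq_true hc
    rw [if_pos hc, getD_set_eq, hf]
    simp only [eq_self_iff_true, and_true]
    by_cases hjk : j = k
    · subst hjk
      by_cases hl : j < st.2.length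
      · rw [if_pos ⟨rfl, hl⟩, if_pos ⟨rfl, hl⟩]
      · rw [if_neg (by tauto), if_neg (by tauto)]; ring
    · rw [if_neg (by tauto), if_neg (fun h => hjk h.1)]; ring
  · have hf : pvF m i j = false := decide_eq_false hc
    rw [if_neg hc, hf]
    simp

lemma innerA_len₁ (m : List (List Int)) (i : Nat) (js : List Nat) (st : List Int × List Int) :
    ((js.foldl (pvAInner m i) st).1).length = st.1.length := by
  induction js generalizing st with
  | nil => rfl
  | cons j js ih => rw [List.foldl_cons, ih, stepA_len₁]

lemma innerA_len₂ (m : List (List Int)) (i : Nat) (js : List Nat) (st : List Int × List Int) :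
    ((js.foldl (pvAInner m i) st).2).length = st.2.length := by
  induction js generalizing st with
  | nil => rfl
  | cons j js ih => rw [List.foldl_cons, ih, stepA_len₂]

lemma innerA_getD₁ (m : List (List Int)) (i : Nat) (js : List Nat) (st : List Int × List Int)
    (k : Nat) :
    ((js.foldl (pvAInner m i) st).1).getD k 0 =
      st.1.getD k 0 + (if k = i ∧ i < st.1.length then ((js.countP (pvF m i) : Nat) : Int) else 0) := by
  induction js generalizing st with
  | nil => simp
  | cons j js ih =>
    rw [List.foldl_cons, ih, stepA_len₁, stepA_getD₁, List.countP_cons]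
    split_ifs <;> simp_all <;> push_cast <;> omega

lemma innerA_getD₂ (m : List (List Int)) (i : Nat) (js : List Nat) (st : List Int × List Int)
    (k : Nat) :
    ((js.foldl (pvAInner m i) st).2).getD k 0 =
      st.2.getD k 0 +
        (if k < st.2.length then ((js.countP (fun j => j == k && pvF m i j) : Nat) : Int) else 0) := by
  induction js generalizing st with
  | nil => simp
  | cons j js ih =>
    rw [List.foldl_cons, ih, stepA_len₂, stepA_getD₂, List.countP_cons]
    by_cases hl : k < st.2.length
    · by_cases hj : j = k <;> by_cases hf : pvF m i j <;>
        simp only [hl, hj, hf, if_true, if_false, eq_self_iff_true, and_true, and_false,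
          true_and, false_and, if_pos, Bool.and_self, beq_self_eq_true, beq_iff_eq] <;>
        split_ifs <;> simp_all <;> push_cast <;> ring
    · have h1 : ¬ (j = k ∧ k < st.2.length ∧ pvF m i j) := by tauto
      rw [if_neg h1, if_neg hl, if_neg hl]
      ring

-- number of zeros in row i (over columns < w)
def pvRow (m : List (List Int)) (w i : Nat) : Nat := (List.range w).countP (pvF m i)

lemma outerA_len₁ (m : List (List Int)) (w : Nat) (is : List Nat) (st : List Int × List Int) :
    ((is.foldl (fun st i => (List.range w).foldl (pvAInner m i) st) st).1).length = st.1.length := by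
  induction is generalizing st with
  | nil => rfl
  | cons i is ih => rw [List.foldl_cons, ih, innerA_len₁]

lemma outerA_len₂ (m : List (List Int)) (w : Nat) (is : List Nat) (st : List Int × List Int) :
    ((is.foldl (fun st i => (List.range w).foldl (pvAInner m i) st) st).2).length = st.2.length := by
  induction is generalizing st with
  | nil => rfl
  | cons i is ih => rw [List.foldl_cons, ih, innerA_len₂]

lemma outerA_getD₁ (m : List (List Int)) (w : Nat) (is : List Nat) (st : List Int × List Int)
    (k : Nat) :
    ((is.foldl (fun st i => (List.range w).foldl (pvAInner m i) st) st).1).getD k 0 =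
      st.1.getD k 0 +
        (if k < st.1.length then ((is.count k : Nat) : Int) * ((pvRow m w k : Nat) : Int) else 0) := by
  induction is generalizing st with
  | nil => simp
  | cons i is ih =>
    rw [List.foldl_cons, ih, innerA_len₁, innerA_getD₁, List.count_cons]
    by_cases hik : i = k
    · subst hik
      split_ifs <;> simp_all [pvRow] <;> push_cast <;> ring
    · have hki : ¬ (k = i) := fun h => hik h.symm
      split_ifs <;> simp_all <;> push_cast <;> ring

lemma outerA_getD₂ (m : List (List Int)) (w : Nat) (is : List Nat) (st : List Int × List Int)
    (k : Nat) :
    ((is.foldl (fun st i => (List.range w).foldl (pvAInner m i) st) st).2).getD k 0 =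
      st.2.getD k 0 +
        (if k < st.2.length then
          ((is.countP (fun i => decide (k < w) && pvF m i k) : Nat) : Int) else 0) := by
  induction is generalizing st with
  | nil => simp
  | cons i is ih =>
    rw [List.foldl_cons, ih, innerA_len₂, innerA_getD₂, List.countP_cons,
      countP_range_indicator]
    by_cases hkw : k < w <;> by_cases hf : pvF m i k <;> split_ifs <;> simp_all <;> push_cast <;> omega

theorem get_histo_2axis_eq (m : List (List Int)) :
    get_histo_2axis m = get_histo_2axis_alt m := by
  have hA : get_histo_2axis m =
      (List.range m.length).foldl
        (fun st i => (List.range (m.headD []).length).foldl (pvAInner m i) st)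
        (List.replicate m.length 0, List.replicate (m.headD []).length 0) := rfl
  have hB : get_histo_2axis_alt m =
      ((List.range m.length).map (fun i =>
        (List.range (m.headD []).length).foldl
          (fun acc j => if (m.getD i []).getD j 1 = 0 then acc + 1 else acc) 0),
       (List.range (m.headD []).length).map (fun j =>
        (List.range m.length).foldl
          (fun acc i => if (m.getD i []).getD j 1 = 0 then acc + 1 else acc) 0)) := rfl
  rw [hA, hB]
  refine Prod.ext ?_ ?_
  · apply List.ext_getElem
    · rw [outerA_len₁]; simp
    · intro k hk1 hk2
      have hkh : k < m.length := by rw [outerA_len₁] at hk1; simpa using hk1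
      have h1 := (List.getD_eq_getElem
        ((List.range m.length).foldl
          (fun st i => (List.range (m.headD []).length).foldl (pvAInner m i) st)
          (List.replicate m.length 0, List.replicate (m.headD []).length 0)).1 0 hk1)
      rw [← h1, outerA_getD₁]
      simp only [List.getElem_map, List.getElem_range]
      rw [foldl_count (fun j => (m.getD k []).getD j 1 = 0)]
      have hfun : (fun j => decide ((m.getD k []).getD j 1 = 0)) = pvF m k := rfl
      rw [hfun]
      simp only [List.getD_replicate, List.length_replicate, List.count_range, hkh, if_pos, pvRow]
      push_cast
      ring
  · apply List.ext_getElem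
    · rw [outerA_len₂]; simp
    · intro k hk1 hk2
      have hkw : k < (m.headD []).length := by rw [outerA_len₂] at hk1; simpa using hk1
      have h1 := (List.getD_eq_getElem
        ((List.range m.length).foldl
          (fun st i => (List.range (m.headD []).length).foldl (pvAInner m i) st)
          (List.replicate m.length 0, List.replicate (m.headD []).length 0)).2 0 hk1)
      rw [← h1, outerA_getD₂]
      simp only [List.getElem_map, List.getElem_range]
      rw [foldl_count (fun i => (m.getD i []).getD k 1 = 0)]
      have hfun : (fun i => decide (k < (m.headD []).length) && pvF m i k)
          = (fun i => decide ((m.getD i []).getD k 1 = 0)) := by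
        funext i
        rw [decide_eq_true hkw, Bool.true_and]
        rfl
      rw [hfun]
      simp only [List.getD_replicate, List.length_replicate, hkw, if_pos]

-- ===== VERDICT (by name: the statement is the Claim_ definition above) =====
theorem get_histo_2axis_spec : Claim_equal_get_histo_2axis := by
  intro m _ _
  unfold Spec_get_histo_2axis
  exact get_histo_2axis_eq m
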